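-- pv_equiv track=rewrite | github.com/MrCasco/pass-technical-interviews | music_favorite_genres.py | get_favorites
-- ===== SOURCE A (Python) =====
-- def get_favorites(dic):
--     # import ipdb; ipdb.set_trace()
--     likes = max(dic.items())
--     favorites = dict(sorted(dic.items(), key=lambda item: item[1], reverse=True))
--     res = {}
--     for key in favorites:
--         if favorites[key] < likes[1]:
--             return res
--         res[key] = favorites[key]
--     return res
-- ===== SOURCE B (Python) =====
-- def get_favorites(dic):
--     # threshold = value of the item with the maximum key (max() raises ValueError on an empty dict, like A)
--     threshold = dic[max(dic)]
--     # keep only qualifying items first, then sort just that subset by value, descending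
--     favs = {k: v for k, v in dic.items() if v >= threshold}
--     return dict(sorted(favs.items(), key=lambda kv: kv[1], reverse=True))
-- ===== Notes on version B (the rewrite author's own statement) =====
-- stated objective: simpler
-- what changed: A sorts the whole dict by value descending and then walks the sorted dict with an early-return loop that stops at the first value below the max-key item's value; B computes the threshold as dic[max(dic)], filters the qualifying items first, and sorts only that subset (no break loop, no intermediate dicts).
import Mathlib
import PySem

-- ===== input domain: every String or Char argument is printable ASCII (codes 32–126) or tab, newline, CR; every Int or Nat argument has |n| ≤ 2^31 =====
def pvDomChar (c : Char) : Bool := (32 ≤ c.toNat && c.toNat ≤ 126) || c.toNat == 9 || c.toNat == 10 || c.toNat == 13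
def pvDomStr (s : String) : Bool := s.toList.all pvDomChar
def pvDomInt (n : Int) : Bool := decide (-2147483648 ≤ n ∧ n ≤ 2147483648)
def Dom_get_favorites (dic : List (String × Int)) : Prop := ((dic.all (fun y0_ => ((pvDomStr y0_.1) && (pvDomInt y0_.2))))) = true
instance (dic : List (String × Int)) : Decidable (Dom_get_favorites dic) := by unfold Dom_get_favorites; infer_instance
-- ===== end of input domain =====

-- B filters the qualifying items first and sorts only that subset, instead of A's sort-everything
-- then early-return loop; same return value (objective: simpler).

-- ===== PORT A =====
-- 'for key in favorites: if favorites[key] < likes[1]: return res; res[key] = favorites[key]' —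
-- iterating a dict with distinct keys yields its (key, value) pairs in order, and assigning a
-- fresh key to the dict 'res' appends the pair.
def getFavLoop (t : Int) : List (String × Int) → List (String × Int) → List (String × Int)
  | res, [] => res
  | res, (k, v) :: rest => if v < t then res else getFavLoop t (res ++ [(k, v)]) rest

def get_favorites (dic : List (String × Int)) : List (String × Int) :=
  match PySem.List.max2? dic Prod.fst Prod.snd with
  | none => []  -- max() of an empty dict raises ValueError: excluded by Pre_
  | some likes =>
      -- favorites = dict(sorted(dic.items(), key=lambda item: item[1], reverse=True));
      -- the keys are distinct, so the dict() keeps exactly the sorted item list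
      getFavLoop likes.2 [] (PySem.List.sorted dic (fun it => it.2) true)

-- ===== PORT B =====
def get_favorites_alt (dic : List (String × Int)) : List (String × Int) :=
  match PySem.List.max? (dic.map Prod.fst) (fun k => k) with
  | none => []  -- max() of an empty dict raises ValueError: excluded by Pre_
  | some mk =>
      match (PySem.Dict.mk dic).get? mk with
      | none => []  -- KeyError: unreachable, mk is one of dic's keys
      | some threshold =>
          -- favs = {k: v for k, v in dic.items() if v >= threshold} (keys stay distinct)
          PySem.List.sorted (dic.filter (fun kv => decide (threshold ≤ kv.2))) (fun kv => kv.2) true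

-- ===== PRECONDITION & SPEC =====
-- Pre_ excludes only the empty dict, where A's max() raises ValueError (B raises too); the
-- Nodup conjunct merely records that the argument is a Python dict, whose keys are distinct.
def Pre_get_favorites (dic : List (String × Int)) : Prop :=
  dic ≠ [] ∧ (dic.map Prod.fst).Nodup
instance (dic : List (String × Int)) : Decidable (Pre_get_favorites dic) := by
  unfold Pre_get_favorites; infer_instance

def pvWitness_get_favorites : (List (String × Int)) := [("rock", 5), ("pop", 3), ("zz", 5)]

def Spec_get_favorites (dic : List (String × Int)) (out : List (String × Int)) : Prop := out = get_favorites_alt dic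
instance (dic : List (String × Int)) (out : List (String × Int)) : Decidable (Spec_get_favorites dic out) := by unfold Spec_get_favorites; infer_instance

-- ===== CLAIM (what is proved, stated in full; the proofs are below) =====
def Claim_equal_get_favorites : Prop := ∀ (dic : List (String × Int)), Dom_get_favorites dic → Pre_get_favorites dic → Spec_get_favorites dic (get_favorites dic)

-- ===== LEMMAS AND PROOFS =====

-- the element A's max(dic.items()) / B's max(dic) select: the running maximum by key
def maxPair (m : String × Int) : List (String × Int) → String × Int
  | [] => m
  | x :: l => maxPair (if m.1 < x.1 then x else m) l

theorem maxPair_mem (l : List (String × Int)) (m : String × Int) :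
    maxPair m l ∈ m :: l := by
  induction l generalizing m with
  | nil => simp [maxPair]
  | cons x l ih =>
      show maxPair (if m.1 < x.1 then x else m) l ∈ m :: x :: l
      rcases List.mem_cons.1 (ih (if m.1 < x.1 then x else m)) with h | h
      · rw [h]; split <;> simp
      · exact List.mem_cons_of_mem _ (List.mem_cons_of_mem _ h)

-- A's tuple max over items with pairwise-distinct keys is the max by key
theorem foldlA_eq_maxPair (f : Option (String × Int) → (String × Int) → Option (String × Int))
    (hf : ∀ m x, x.1 ≠ m.1 → f (some m) x = some (if m.1 < x.1 then x else m))
    (l : List (String × Int)) (m : String × Int)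
    (hne : ∀ x ∈ l, x.1 ≠ m.1) (hnd : (l.map Prod.fst).Nodup) :
    List.foldl f (some m) l = some (maxPair m l) := by
  induction l generalizing m with
  | nil => simp [maxPair]
  | cons x l ih =>
      have hxm : x.1 ≠ m.1 := hne x (by simp)
      simp only [List.map_cons, List.nodup_cons] at hnd
      rw [List.foldl_cons, hf m x hxm]
      show _ = some (maxPair (if m.1 < x.1 then x else m) l)
      by_cases hc : m.1 < x.1
      · rw [if_pos hc]
        exact ih x (fun y hy e => hnd.1 (e ▸ List.mem_map_of_mem hy)) hnd.2
      · rw [if_neg hc]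
        exact ih m (fun y hy => hne y (List.mem_cons_of_mem _ hy)) hnd.2

-- B's max over the keys is the key of the same element (no side conditions needed)
theorem foldlB_eq_maxPair (f : Option String → String → Option String)
    (hf : ∀ m x, f (some m) x = some (if m < x then x else m))
    (l : List (String × Int)) (m : String × Int) :
    List.foldl f (some m.1) (l.map Prod.fst) = some (maxPair m l).1 := by
  induction l generalizing m with
  | nil => simp [maxPair]
  | cons x l ih =>
      rw [List.map_cons, List.foldl_cons, hf m.1 x.1]
      show _ = some (maxPair (if m.1 < x.1 then x else m) l).1
      by_cases hc : m.1 < x.1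
      · simp only [if_pos hc]; exact ih x
      · simp only [if_neg hc]; exact ih m

-- A's loop is takeWhile on the sorted list
theorem getFavLoop_eq_takeWhile (t : Int) (l res : List (String × Int)) :
    getFavLoop t res l = res ++ l.takeWhile (fun kv => decide (t ≤ kv.2)) := by
  induction l generalizing res with
  | nil => simp [getFavLoop]
  | cons x l ih =>
      obtain ⟨k, v⟩ := x
      by_cases h : v < t
      · simp [getFavLoop, h, not_le_of_gt h]
      · simp [getFavLoop, h, not_lt.1 h, ih]

-- on a value-descending list, takeWhile (t ≤ value) is filter (t ≤ value)
theorem takeWhile_eq_filter_of_desc (t : Int) (l : List (String × Int))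
    (hp : l.Pairwise (fun a b => b.2 ≤ a.2)) :
    l.takeWhile (fun kv => decide (t ≤ kv.2)) = l.filter (fun kv => decide (t ≤ kv.2)) := by
  induction l with
  | nil => rfl
  | cons x l ih =>
      rcases List.pairwise_cons.1 hp with ⟨hx, hl⟩
      by_cases h : t ≤ x.2
      · simp [h, ih hl]
      · have : l.filter (fun kv => decide (t ≤ kv.2)) = [] :=
          List.filter_eq_nil_iff.2 fun y hy => by
            simpa using not_le.2 (lt_of_le_of_lt (hx y hy) (not_le.1 h))
        simp [h, this]

-- inserting an element that beats everything goes to the front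
theorem insertBy_front {α κ : Type} [LinearOrder κ] (key : α → κ) (x : α) (l : List α)
    (h : ∀ z ∈ l, key z < key x) :
    PySem.List.insertBy (fun a b => decide (key b < key a)) x l = x :: l := by
  cases l with
  | nil => rfl
  | cons y ys => simp [PySem.List.insertBy, h y (by simp)]

theorem pairwise_insertBy {α κ : Type} [LinearOrder κ] (key : α → κ) (x : α) (l : List α)
    (h : l.Pairwise (fun a b => key b ≤ key a)) :
    (PySem.List.insertBy (fun a b => decide (key b < key a)) x l).Pairwise
      (fun a b => key b ≤ key a) := by
  induction l with
  | nil => simp [PySem.List.insertBy]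
  | cons y ys ih =>
      rcases List.pairwise_cons.1 h with ⟨hy, hys⟩
      by_cases hxy : key y < key x
      · simp only [PySem.List.insertBy, decide_eq_true_eq, if_pos hxy]
        exact List.pairwise_cons.2 ⟨fun z hz => by
          rcases List.mem_cons.1 hz with rfl | hz
          · exact le_of_lt hxy
          · exact le_trans (hy z hz) (le_of_lt hxy), h⟩
      · simp only [PySem.List.insertBy, decide_eq_true_eq, if_neg hxy]
        exact List.pairwise_cons.2 ⟨fun z hz => by
          rcases (PySem.List.mem_insertBy _ _ _ _).1 hz with rfl | hz
          · exact not_lt.1 hxy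
          · exact hy z hz, ih hys⟩

-- filtering commutes with a stable descending insertion
theorem filter_insertBy {α κ : Type} [LinearOrder κ] (key : α → κ) (p : α → Bool)
    (x : α) (l : List α) (h : l.Pairwise (fun a b => key b ≤ key a)) :
    (PySem.List.insertBy (fun a b => decide (key b < key a)) x l).filter p =
      if p x then PySem.List.insertBy (fun a b => decide (key b < key a)) x (l.filter p)
      else l.filter p := by
  induction l with
  | nil => cases hx : p x <;> simp [PySem.List.insertBy, hx]
  | cons y ys ih =>
      rcases List.pairwise_cons.1 h with ⟨hy, hys⟩
      by_cases hxy : key y < key x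
      · simp only [PySem.List.insertBy, decide_eq_true_eq, if_pos hxy]
        cases hx : p x with
        | false => simp [List.filter_cons, hx]
        | true =>
            have hfr : ∀ z ∈ (y :: ys).filter p, key z < key x := by
              intro z hz
              rcases List.mem_cons.1 (List.mem_of_mem_filter hz) with rfl | hz'
              · exact hxy
              · exact lt_of_le_of_lt (hy z hz') hxy
            rw [insertBy_front key x _ hfr]
            simp [List.filter_cons, hx]
      · simp only [PySem.List.insertBy, decide_eq_true_eq, if_neg hxy]
        cases hx : p x with
        | false =>
            cases hyp : p y <;>
              simp [hyp, ih hys, hx]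
        | true =>
            cases hyp : p y with
            | false => simp [hyp, ih hys, hx]
            | true =>
                simp [hyp, ih hys, hx, PySem.List.insertBy, hxy]

-- filtering commutes with the whole insertion-sort fold
theorem filter_foldl_insertBy {α κ : Type} [LinearOrder κ] (key : α → κ) (p : α → Bool)
    (l acc : List α) (h : acc.Pairwise (fun a b => key b ≤ key a)) :
    (l.foldl (fun acc x => PySem.List.insertBy (fun a b => decide (key b < key a)) x acc) acc).filter p
      = (l.filter p).foldl
          (fun acc x => PySem.List.insertBy (fun a b => decide (key b < key a)) x acc)
          (acc.filter p) := by
  induction l generalizing acc with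
  | nil => rfl
  | cons x l ih =>
      simp only [List.foldl_cons, List.filter_cons]
      have hstep := filter_insertBy key p x acc h
      cases hx : p x with
      | false =>
          rw [ih _ (pairwise_insertBy key x acc h), hstep]
          simp [hx]
      | true =>
          rw [ih _ (pairwise_insertBy key x acc h), hstep]
          simp [hx]

-- stable sort commutes with filter
theorem sorted_filter {α κ : Type} [LinearOrder κ] (key : α → κ) (p : α → Bool) (xs : List α) :
    (PySem.List.sorted xs key true).filter p = PySem.List.sorted (xs.filter p) key true := by
  rw [PySem.List.sorted_rev_eq_foldl_insertBy, PySem.List.sorted_rev_eq_foldl_insertBy]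
  simpa using filter_foldl_insertBy key p xs [] (by simp)

-- ===== VERDICT (by name: the statement is the Claim_ definition above) =====
theorem get_favorites_spec : Claim_equal_get_favorites := by
  intro dic _ hpre
  rcases hpre with ⟨hne, hnd⟩
  unfold Spec_get_favorites
  cases dic with
  | nil => exact absurd rfl hne
  | cons d rest =>
      simp only [List.map_cons, List.nodup_cons] at hnd
      -- the two max computations
      have hA : PySem.List.max2? (d :: rest) Prod.fst Prod.snd = some (maxPair d rest) := by
        simp only [PySem.List.max2?, List.foldl_cons]
        refine foldlA_eq_maxPair _ ?_ rest d
          (fun x hx e => hnd.1 (e ▸ List.mem_map_of_mem hx)) hnd.2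
        intro m x hxm
        rcases lt_trichotomy m.1 x.1 with h | h | h
        · simp [h]
        · exact absurd h.symm hxm
        · simp [h, not_lt_of_gt h]
      have hB : PySem.List.max? ((d :: rest).map Prod.fst) (fun k => k) = some (maxPair d rest).1 := by
        simp only [PySem.List.max?, List.map_cons, List.foldl_cons]
        refine foldlB_eq_maxPair _ ?_ rest d
        intro m x
        by_cases h : m < x <;> simp [h]
      -- the lookup dic[max(dic)]
      have hget : (PySem.Dict.mk (d :: rest)).get? (maxPair d rest).1
          = some (maxPair d rest).2 := by
        apply PySem.Dict.get?_of_mem_items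
        · simpa using maxPair_mem rest d
        · simp only [PySem.Dict.keys, List.map_cons, List.nodup_cons]
          exact hnd
      rw [get_favorites, get_favorites_alt, hA, hB]
      simp only [hget]
      rw [getFavLoop_eq_takeWhile, List.nil_append,
          takeWhile_eq_filter_of_desc _ _ (PySem.List.sorted_pairwise_rev _ _),
          sorted_filter]
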